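-- pv_equiv track=rewrite | github.com/esauvisky/homeassistant-networkmap | networkmap/utils.py | determine_icon
-- ===== SOURCE A (Python) =====
-- from typing import Dict
--
-- TYPE_KEYWORDS = [
--     ("mdi:cast",            ["cast", "chromecast", "dongle", "google tv"]),
--     ("mdi:home-automation", ["homekit", "home assistant", "smartthings", "bridge"]),
--     ("mdi:android-tv",      ["android tv", "android_tv", "fire tv", "firestick"]),
--     ("mdi:television",      ["television", "tv", "roku", "apple tv", "samsung tv"]),
--     ("mdi:chip",            ["esphome", "esp32", "esp8266", "espressif", "arduino"]),
--     ("mdi:speaker",         ["sonos", "homepod", "speaker", "bose", "denon", "yamaha"]),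
--     ("mdi:lightbulb",       ["hue", "light", "philips", "lifx", "yeelight"]),
--     ("mdi:cellphone",       ["pixel", "galaxy", "phone", "smartphone",
--                              "oneplus"]),
--     ("mdi:tablet-ipad",     ["ipad", "tablet", "galaxy tab", "surface go"]),
--     ("mdi:laptop",          ["laptop", "notebook", "macbook", "xps",
--                              "thinkpad", "surface book"]),
--     ("mdi:desktop-classic", ["desktop", "pc", "imac", "mac mini", "mac pro"]),
--     ("mdi:camera",          ["camera", "cctv", "ipcam", "webcam", "ring cam",
--                              "arlo", "nest cam"]),
--     ("mdi:printer",         ["printer", "epson", "canon", "brother", "hp"]),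
--     ("mdi:server",          ["server", "nas", "synology", "qnap", "unraid"]),
--     ("mdi:router-network",  ["router", "gateway", "asus", "netgear",
--                              "ubiquiti", "tp-link", "linksys"]),
--     ("mdi:network",         ["switch", "repeater", "access point",
--                              "unifi", "meraki", "bridge"]),
--     ("mdi:thermostat",      ["thermostat", "nest thermostat",
--                              "tado", "hive", "ecobee", "climate"]),
--     ("mdi:lock",            ["lock", "smart lock", "schlage", "august",
--                              "yale", "kwikset"]),
--     ("mdi:light-switch",    ["switch", "smart switch", "sonoff", "kasa"]),
--     ("mdi:power-plug",      ["plug", "outlet", "smart plug", "kasa",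
--                              "tp-link hs"]),
--     ("mdi:fan",             ["fan", "ventilator"]),
--     ("mdi:water-percent",   ["humidity", "humidifier", "hygrometer"]),
--     ("mdi:thermometer",     ["temperature", "temp sensor", "thermometer"]),
--     ("mdi:motion-sensor",   ["motion", "pir sensor", "presence"]),
--     ("mdi:smoke-detector",  ["smoke", "co2", "carbon monoxide"]),
-- ]
--
-- VENDOR_ICONS = {
--     "apple":        "mdi:apple",
--     "amazon":       "mdi:amazon",
--     "google":       "mdi:google",
--     "samsung":      "mdi:samsung",
--     "sony":         "mdi:sony",
--     "microsoft":    "mdi:microsoft",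
--     "roku":         "mdi:roku",
--     "playstation":  "mdi:playstation",
--     "nintendo":     "mdi:nintendo-switch",
--     "xbox":         "mdi:xbox",
--     "ubiquiti":     "mdi:ubiquiti",
--     "tp-link":      "mdi:router-network",
--     "netgear":      "mdi:router-network",
--     "huawei":       "mdi:cellphone",
--     "lg":           "mdi:lg",
--     "hp":           "mdi:printer",
--     "dell":         "mdi:laptop",
--     "canon":        "mdi:printer",
--     "epson":        "mdi:printer",
--     "brother":      "mdi:printer",
-- }
--
-- DEFAULT_ICON = "mdi:lan-connect"
--
-- FIELD_ORDER  = ["device_type", "device_model", "hostname", "vendor"]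
--
-- def determine_icon(device_data: Dict[str, str]) -> str:
--     """
--     1) Try every (icon, keywords) in TYPE_KEYWORDS against
--        device_type → device_model → hostname → vendor.
--     2) If nothing matches, look for a brand in `vendor`.
--     3) Else fall back to DEFAULT_ICON.
--     """
--     for icon, keywords in TYPE_KEYWORDS:
--         for field in FIELD_ORDER:
--             val = device_data.get(field, "")
--             if not val:
--                 continue
--             norm = val.replace("-", " ").lower()
--             if any(kw in norm for kw in keywords):
--                 return icon
--
--     vendor = device_data.get("vendor", "").lower()
--     for brand, icon in VENDOR_ICONS.items():
--         if brand in vendor: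
--             return icon
--
--     return DEFAULT_ICON
-- ===== SOURCE B (Python) =====
-- from typing import Dict
--
-- # Each row: (icon, comma-joined keywords).  Same priority order as upstream.
-- ICON_SPECS = [
--     ("mdi:cast",            "cast,chromecast,dongle,google tv"),
--     ("mdi:home-automation", "homekit,home assistant,smartthings,bridge"),
--     ("mdi:android-tv",      "android tv,android_tv,fire tv,firestick"),
--     ("mdi:television",      "television,tv,roku,apple tv,samsung tv"),
--     ("mdi:chip",            "esphome,esp32,esp8266,espressif,arduino"),
--     ("mdi:speaker",         "sonos,homepod,speaker,bose,denon,yamaha"),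
--     ("mdi:lightbulb",       "hue,light,philips,lifx,yeelight"),
--     ("mdi:cellphone",       "pixel,galaxy,phone,smartphone,oneplus"),
--     ("mdi:tablet-ipad",     "ipad,tablet,galaxy tab,surface go"),
--     ("mdi:laptop",          "laptop,notebook,macbook,xps,thinkpad,surface book"),
--     ("mdi:desktop-classic", "desktop,pc,imac,mac mini,mac pro"),
--     ("mdi:camera",          "camera,cctv,ipcam,webcam,ring cam,arlo,nest cam"),
--     ("mdi:printer",         "printer,epson,canon,brother,hp"),
--     ("mdi:server",          "server,nas,synology,qnap,unraid"),
--     ("mdi:router-network",  "router,gateway,asus,netgear,ubiquiti,tp-link,linksys"),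
--     ("mdi:network",         "switch,repeater,access point,unifi,meraki,bridge"),
--     ("mdi:thermostat",      "thermostat,nest thermostat,tado,hive,ecobee,climate"),
--     ("mdi:lock",            "lock,smart lock,schlage,august,yale,kwikset"),
--     ("mdi:light-switch",    "switch,smart switch,sonoff,kasa"),
--     ("mdi:power-plug",      "plug,outlet,smart plug,kasa,tp-link hs"),
--     ("mdi:fan",             "fan,ventilator"),
--     ("mdi:water-percent",   "humidity,humidifier,hygrometer"),
--     ("mdi:thermometer",     "temperature,temp sensor,thermometer"),
--     ("mdi:motion-sensor",   "motion,pir sensor,presence"),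
--     ("mdi:smoke-detector",  "smoke,co2,carbon monoxide"),
-- ]
--
-- VENDOR_ICONS = {
--     "apple":        "mdi:apple",
--     "amazon":       "mdi:amazon",
--     "google":       "mdi:google",
--     "samsung":      "mdi:samsung",
--     "sony":         "mdi:sony",
--     "microsoft":    "mdi:microsoft",
--     "roku":         "mdi:roku",
--     "playstation":  "mdi:playstation",
--     "nintendo":     "mdi:nintendo-switch",
--     "xbox":         "mdi:xbox",
--     "ubiquiti":     "mdi:ubiquiti",
--     "tp-link":      "mdi:router-network",
--     "netgear":      "mdi:router-network",
--     "huawei":       "mdi:cellphone",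
--     "lg":           "mdi:lg",
--     "hp":           "mdi:printer",
--     "dell":         "mdi:laptop",
--     "canon":        "mdi:printer",
--     "epson":        "mdi:printer",
--     "brother":      "mdi:printer",
-- }
--
-- DEFAULT_ICON = "mdi:lan-connect"
--
-- FIELD_ORDER = ["device_type", "device_model", "hostname", "vendor"]
--
--
-- def determine_icon(device_data: Dict[str, str]) -> str:
--     # Build one newline-joined normalized haystack (no keyword contains a
--     # newline, so no cross-field false positives), then find the first
--     # matching row; the icon never depends on which field matched.
--     combined = "\n".join(
--         device_data.get(field, "").replace("-", " ").lower()
--         for field in FIELD_ORDER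
--     )
--     hit = next(
--         (icon for icon, kws in ICON_SPECS
--          if any(kw in combined for kw in kws.split(","))),
--         None,
--     )
--     if hit is not None:
--         return hit
--     vendor = device_data.get("vendor", "").lower()
--     return next(
--         (icon for brand, icon in VENDOR_ICONS.items() if brand in vendor),
--         DEFAULT_ICON,
--     )
-- ===== Notes on version B (the rewrite author's own statement) =====
-- stated objective: alternative
-- what changed: B stores the keyword table as comma-joined rows, joins all four normalized fields once into one newline-separated haystack, and replaces A's nested per-row/per-field loops with a single find-first scan (next/any over kws.split(',')); the vendor fallback becomes a find-first over the vendor table instead of an explicit loop.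
import Mathlib
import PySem

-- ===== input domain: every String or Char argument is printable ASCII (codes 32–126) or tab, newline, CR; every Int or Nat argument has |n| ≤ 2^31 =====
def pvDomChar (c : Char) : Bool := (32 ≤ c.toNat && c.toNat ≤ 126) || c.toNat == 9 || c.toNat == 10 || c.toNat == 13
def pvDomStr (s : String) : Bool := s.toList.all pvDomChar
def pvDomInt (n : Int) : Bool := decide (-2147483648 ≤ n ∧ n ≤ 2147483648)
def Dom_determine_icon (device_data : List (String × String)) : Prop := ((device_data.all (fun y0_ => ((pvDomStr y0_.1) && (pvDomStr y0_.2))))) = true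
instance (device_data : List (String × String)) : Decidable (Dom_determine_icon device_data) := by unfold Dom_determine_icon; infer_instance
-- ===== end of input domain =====

-- B stores the keyword table as comma-joined rows, normalizes all four fields once into
-- one newline-joined haystack and picks the first matching row with a single find-first
-- scan, dropping A's inner per-field loop (objective: alternative decomposition).

-- ===== PORT A =====
def pvTypeKeywords : List (String × List String) := [
  ("mdi:cast",            ["cast", "chromecast", "dongle", "google tv"]),
  ("mdi:home-automation", ["homekit", "home assistant", "smartthings", "bridge"]),
  ("mdi:android-tv",      ["android tv", "android_tv", "fire tv", "firestick"]),
  ("mdi:television",      ["television", "tv", "roku", "apple tv", "samsung tv"]),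
  ("mdi:chip",            ["esphome", "esp32", "esp8266", "espressif", "arduino"]),
  ("mdi:speaker",         ["sonos", "homepod", "speaker", "bose", "denon", "yamaha"]),
  ("mdi:lightbulb",       ["hue", "light", "philips", "lifx", "yeelight"]),
  ("mdi:cellphone",       ["pixel", "galaxy", "phone", "smartphone", "oneplus"]),
  ("mdi:tablet-ipad",     ["ipad", "tablet", "galaxy tab", "surface go"]),
  ("mdi:laptop",          ["laptop", "notebook", "macbook", "xps", "thinkpad", "surface book"]),
  ("mdi:desktop-classic", ["desktop", "pc", "imac", "mac mini", "mac pro"]),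
  ("mdi:camera",          ["camera", "cctv", "ipcam", "webcam", "ring cam", "arlo", "nest cam"]),
  ("mdi:printer",         ["printer", "epson", "canon", "brother", "hp"]),
  ("mdi:server",          ["server", "nas", "synology", "qnap", "unraid"]),
  ("mdi:router-network",  ["router", "gateway", "asus", "netgear", "ubiquiti", "tp-link", "linksys"]),
  ("mdi:network",         ["switch", "repeater", "access point", "unifi", "meraki", "bridge"]),
  ("mdi:thermostat",      ["thermostat", "nest thermostat", "tado", "hive", "ecobee", "climate"]),
  ("mdi:lock",            ["lock", "smart lock", "schlage", "august", "yale", "kwikset"]),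
  ("mdi:light-switch",    ["switch", "smart switch", "sonoff", "kasa"]),
  ("mdi:power-plug",      ["plug", "outlet", "smart plug", "kasa", "tp-link hs"]),
  ("mdi:fan",             ["fan", "ventilator"]),
  ("mdi:water-percent",   ["humidity", "humidifier", "hygrometer"]),
  ("mdi:thermometer",     ["temperature", "temp sensor", "thermometer"]),
  ("mdi:motion-sensor",   ["motion", "pir sensor", "presence"]),
  ("mdi:smoke-detector",  ["smoke", "co2", "carbon monoxide"])]

def pvVendorIcons : List (String × String) := [
  ("apple", "mdi:apple"), ("amazon", "mdi:amazon"), ("google", "mdi:google"),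
  ("samsung", "mdi:samsung"), ("sony", "mdi:sony"), ("microsoft", "mdi:microsoft"),
  ("roku", "mdi:roku"), ("playstation", "mdi:playstation"), ("nintendo", "mdi:nintendo-switch"),
  ("xbox", "mdi:xbox"), ("ubiquiti", "mdi:ubiquiti"), ("tp-link", "mdi:router-network"),
  ("netgear", "mdi:router-network"), ("huawei", "mdi:cellphone"), ("lg", "mdi:lg"),
  ("hp", "mdi:printer"), ("dell", "mdi:laptop"), ("canon", "mdi:printer"),
  ("epson", "mdi:printer"), ("brother", "mdi:printer")]

def pvFields : List String := ["device_type", "device_model", "hostname", "vendor"]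

-- device_data.get(field, "")  (shared: both sources call dict.get identically)
def pvGet (device_data : List (String × String)) (f : String) : String :=
  PySem.Dict.getD (PySem.Dict.mk device_data) f ""

-- val.replace("-", " ").lower()  (identical expression in both sources)
def pvNorm (v : String) : String := PySem.Str.lower (PySem.Str.replace v "-" " ")

-- A's vendor-fallback loop: for brand, icon in VENDOR_ICONS.items(): …
def pvVendorLoop (vendor : String) : List (String × String) → Option String
  | [] => none
  | (brand, icon) :: rest =>
      if PySem.Str.isIn brand vendor then some icon else pvVendorLoop vendor rest

-- A's inner loop: for field in FIELD_ORDER: val = get(...); if not val: continue; …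
def pvFieldLoop (device_data : List (String × String)) (icon : String)
    (kws : List String) : List String → Option String
  | [] => none
  | f :: fs =>
      let val := pvGet device_data f
      if val == "" then pvFieldLoop device_data icon kws fs
      else if kws.any (fun kw => PySem.Str.isIn kw (pvNorm val)) then some icon
      else pvFieldLoop device_data icon kws fs

-- A's outer loop over TYPE_KEYWORDS
def pvGoA (device_data : List (String × String)) : List (String × List String) → Option String
  | [] => none
  | (icon, kws) :: rest =>
      match pvFieldLoop device_data icon kws pvFields with
      | some r => some r
      | none => pvGoA device_data rest

def determine_icon (device_data : List (String × String)) : String :=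
  match pvGoA device_data pvTypeKeywords with
  | some icon => icon
  | none =>
      let vendor := PySem.Str.lower (pvGet device_data "vendor")
      match pvVendorLoop vendor pvVendorIcons with
      | some icon => icon
      | none => "mdi:lan-connect"

-- ===== PORT B =====
-- B's table: (icon, comma-joined keywords), same priority order
def pvIconSpecs : List (String × String) := [
  ("mdi:cast",            "cast,chromecast,dongle,google tv"),
  ("mdi:home-automation", "homekit,home assistant,smartthings,bridge"),
  ("mdi:android-tv",      "android tv,android_tv,fire tv,firestick"),
  ("mdi:television",      "television,tv,roku,apple tv,samsung tv"),
  ("mdi:chip",            "esphome,esp32,esp8266,espressif,arduino"),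
  ("mdi:speaker",         "sonos,homepod,speaker,bose,denon,yamaha"),
  ("mdi:lightbulb",       "hue,light,philips,lifx,yeelight"),
  ("mdi:cellphone",       "pixel,galaxy,phone,smartphone,oneplus"),
  ("mdi:tablet-ipad",     "ipad,tablet,galaxy tab,surface go"),
  ("mdi:laptop",          "laptop,notebook,macbook,xps,thinkpad,surface book"),
  ("mdi:desktop-classic", "desktop,pc,imac,mac mini,mac pro"),
  ("mdi:camera",          "camera,cctv,ipcam,webcam,ring cam,arlo,nest cam"),
  ("mdi:printer",         "printer,epson,canon,brother,hp"),
  ("mdi:server",          "server,nas,synology,qnap,unraid"),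
  ("mdi:router-network",  "router,gateway,asus,netgear,ubiquiti,tp-link,linksys"),
  ("mdi:network",         "switch,repeater,access point,unifi,meraki,bridge"),
  ("mdi:thermostat",      "thermostat,nest thermostat,tado,hive,ecobee,climate"),
  ("mdi:lock",            "lock,smart lock,schlage,august,yale,kwikset"),
  ("mdi:light-switch",    "switch,smart switch,sonoff,kasa"),
  ("mdi:power-plug",      "plug,outlet,smart plug,kasa,tp-link hs"),
  ("mdi:fan",             "fan,ventilator"),
  ("mdi:water-percent",   "humidity,humidifier,hygrometer"),
  ("mdi:thermometer",     "temperature,temp sensor,thermometer"),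
  ("mdi:motion-sensor",   "motion,pir sensor,presence"),
  ("mdi:smoke-detector",  "smoke,co2,carbon monoxide")]

-- kws.split(",")  (sep nonempty, so Python split(sep) = PySem.Str.split?; exact)
def pvSplitComma (s : String) : List String := (PySem.Str.split? s ",").getD []

-- "\n".join(get(field,"").replace("-"," ").lower() for field in FIELD_ORDER)
def pvCombined (device_data : List (String × String)) : String :=
  PySem.Str.join "\n" (pvFields.map (fun f => pvNorm (pvGet device_data f)))

def determine_icon_alt (device_data : List (String × String)) : String :=
  let combined := pvCombined device_data
  -- next((icon for icon, kws in ICON_SPECS if any(kw in combined for kw in kws.split(","))), None)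
  match pvIconSpecs.find?
      (fun r => (pvSplitComma r.2).any (fun kw => PySem.Str.isIn kw combined)) with
  | some r => r.1
  | none =>
      let vendor := PySem.Str.lower (pvGet device_data "vendor")
      -- next((icon for brand, icon in VENDOR_ICONS.items() if brand in vendor), DEFAULT_ICON)
      match pvVendorIcons.find? (fun p => PySem.Str.isIn p.1 vendor) with
      | some p => p.2
      | none => "mdi:lan-connect"

-- ===== PRECONDITION & SPEC =====
def Spec_determine_icon (device_data : List (String × String)) (out : String) : Prop := out = determine_icon_alt device_data
instance (device_data : List (String × String)) (out : String) : Decidable (Spec_determine_icon device_data out) := by unfold Spec_determine_icon; infer_instance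

-- ===== CLAIM (what is proved, stated in full; the proofs are below) =====
def Claim_equal_determine_icon : Prop := ∀ (device_data : List (String × String)), Dom_determine_icon device_data → Spec_determine_icon device_data (determine_icon device_data)

-- ===== LEMMAS AND PROOFS =====

-- proof-only bridge: a first-match scan over expanded rows against the combined string
def pvGoB (combined : String) : List (String × List String) → Option String
  | [] => none
  | (icon, kws) :: rest =>
      if kws.any (fun kw => PySem.Str.isIn kw combined) then some icon
      else pvGoB combined rest

-- every keyword is nonempty and newline-free (checked once by the kernel)
def pvKwOk (kw : String) : Bool := !(kw.toList.isEmpty) && !(kw.toList.contains '\n')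

lemma pv_kws_ok : pvTypeKeywords.all (fun r => r.2.all pvKwOk) = true := by decide

-- splitting B's comma-joined rows recovers A's keyword table
lemma pv_specs : pvIconSpecs.map (fun r => (r.1, pvSplitComma r.2)) = pvTypeKeywords := by decide

-- a word not containing c is a prefix of l ++ c :: b iff it is a prefix of l
lemma pv_prefix_append_cons (kw l b : List Char) (c : Char) (hc : c ∉ kw) :
    kw <+: l ++ c :: b ↔ kw <+: l := by
  induction kw generalizing l with
  | nil => simp
  | cons k kw ih =>
    cases l with
    | nil =>
      simp only [List.nil_append, List.cons_prefix_cons]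
      constructor
      · rintro ⟨rfl, -⟩; exact absurd (List.mem_cons_self) hc
      · intro h; exact absurd h (by simp)
    | cons x l =>
      simp only [List.cons_append, List.cons_prefix_cons]
      rw [ih l (fun hm => hc (List.mem_cons_of_mem _ hm))]

-- a word not containing c is an infix of l ++ c :: b iff it is an infix of l or of b
lemma pv_infix_append_cons (kw a b : List Char) (c : Char) (hc : c ∉ kw) :
    kw <:+: a ++ c :: b ↔ kw <:+: a ∨ kw <:+: b := by
  induction a with
  | nil =>
    simp only [List.nil_append, List.infix_cons_iff]
    rw [show (c :: b) = [] ++ c :: b from rfl, pv_prefix_append_cons kw [] b c hc]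
    constructor
    · rintro (h | h)
      · left; simp_all
      · right; exact h
    · rintro (h | h)
      · left; rw [List.infix_nil] at h; simp [h]
      · right; exact h
  | cons x a ih =>
    rw [List.cons_append, List.infix_cons_iff,
      show x :: (a ++ c :: b) = (x :: a) ++ c :: b from rfl,
      pv_prefix_append_cons kw (x :: a) b c hc, ih, List.infix_cons_iff]
    tauto

-- membership of a newline-free keyword in the 4-way join splits fieldwise
lemma pv_isIn_combined (device_data : List (String × String)) (kw : String)
    (hc : '\n' ∉ kw.toList) :
    PySem.Str.isIn kw (pvCombined device_data) =
      (pvFields.any (fun f => PySem.Str.isIn kw (pvNorm (pvGet device_data f)))) := by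
  rw [Bool.eq_iff_iff]
  have htl : (pvCombined device_data).toList =
      (pvNorm (pvGet device_data "device_type")).toList ++ '\n' ::
        ((pvNorm (pvGet device_data "device_model")).toList ++ '\n' ::
          ((pvNorm (pvGet device_data "hostname")).toList ++ '\n' ::
            (pvNorm (pvGet device_data "vendor")).toList)) := by
    rw [pvCombined, PySem.Str.toList_join]
    simp only [pvFields, List.map_cons, List.map_nil,
      PySem.Chars.join_cons_cons, PySem.Chars.join_singleton]
    simp [List.append_assoc]
  rw [PySem.Str.isIn_eq, htl, PySem.Chars.isIn_iff_infix]
  rw [pv_infix_append_cons _ _ _ _ hc, pv_infix_append_cons _ _ _ _ hc,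
    pv_infix_append_cons _ _ _ _ hc]
  simp only [pvFields, List.any_cons, List.any_nil, Bool.or_eq_true,
    Bool.or_false, PySem.Str.isIn_eq, PySem.Chars.isIn_iff_infix]

-- a nonempty keyword never matches the normalization of the empty string
lemma pv_empty_field (kw : String) (hne : kw.toList ≠ []) :
    PySem.Str.isIn kw (pvNorm "") = false := by
  rw [PySem.Str.isIn_eq, PySem.Chars.isIn_eq_false_iff,
    show (pvNorm "").toList = [] from rfl, List.infix_nil]
  exact hne

-- A's inner loop, written as one boolean test over the fields
lemma pv_fieldLoop_any (device_data : List (String × String)) (icon : String)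
    (kws : List String) (fs : List String) :
    pvFieldLoop device_data icon kws fs =
      (if fs.any (fun f => (!(pvGet device_data f == "")) &&
          kws.any (fun kw => PySem.Str.isIn kw (pvNorm (pvGet device_data f))))
        then some icon else none) := by
  induction fs with
  | nil => simp [pvFieldLoop]
  | cons f fs ih =>
    simp only [pvFieldLoop]
    by_cases h0 : (pvGet device_data f == "") = true
    · rw [if_pos h0, ih]
      have hb : ((f :: fs).any (fun f => (!(pvGet device_data f == "")) &&
            kws.any (fun kw => PySem.Str.isIn kw (pvNorm (pvGet device_data f)))))
          = fs.any (fun f => (!(pvGet device_data f == "")) &&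
            kws.any (fun kw => PySem.Str.isIn kw (pvNorm (pvGet device_data f)))) := by
        simp only [List.any_cons, h0, Bool.not_true, Bool.false_and, Bool.false_or]
      rw [hb]
    · rw [if_neg h0]
      rw [Bool.not_eq_true] at h0
      by_cases h1 : (kws.any fun kw => PySem.Str.isIn kw (pvNorm (pvGet device_data f))) = true
      · rw [if_pos h1]
        have hb : ((f :: fs).any (fun f => (!(pvGet device_data f == "")) &&
              kws.any (fun kw => PySem.Str.isIn kw (pvNorm (pvGet device_data f))))) = true := by
          simp only [List.any_cons, h0, h1, Bool.not_false, Bool.true_and, Bool.true_or]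
        rw [hb, if_pos rfl]
      · rw [if_neg h1, ih]
        rw [Bool.not_eq_true] at h1
        have hb : ((f :: fs).any (fun f => (!(pvGet device_data f == "")) &&
              kws.any (fun kw => PySem.Str.isIn kw (pvNorm (pvGet device_data f)))))
            = fs.any (fun f => (!(pvGet device_data f == "")) &&
              kws.any (fun kw => PySem.Str.isIn kw (pvNorm (pvGet device_data f)))) := by
          simp only [List.any_cons, h0, h1, Bool.not_false, Bool.true_and, Bool.false_or]
        rw [hb]

-- per row, A's field loop and the combined-string test agree
lemma pv_row (device_data : List (String × String)) (icon : String) (kws : List String)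
    (hok : kws.all pvKwOk = true) :
    pvFieldLoop device_data icon kws pvFields =
      (if kws.any (fun kw => PySem.Str.isIn kw (pvCombined device_data))
        then some icon else none) := by
  have hkw : ∀ kw ∈ kws, kw.toList ≠ [] ∧ '\n' ∉ kw.toList := by
    intro kw hm
    have h2 := (List.all_eq_true.mp hok) kw hm
    simp only [pvKwOk, Bool.and_eq_true, Bool.not_eq_true', List.isEmpty_eq_false_iff] at h2
    exact ⟨by simpa using h2.1, by simpa using h2.2⟩
  have hcond : (pvFields.any (fun f => (!(pvGet device_data f == "")) &&
        kws.any (fun kw => PySem.Str.isIn kw (pvNorm (pvGet device_data f)))))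
      = kws.any (fun kw => PySem.Str.isIn kw (pvCombined device_data)) := by
    rw [Bool.eq_iff_iff]
    simp only [List.any_eq_true, Bool.and_eq_true, Bool.not_eq_true', beq_eq_false_iff_ne]
    constructor
    · rintro ⟨f, hf, _, kw, hkwm, hin⟩
      refine ⟨kw, hkwm, ?_⟩
      rw [pv_isIn_combined _ _ (hkw kw hkwm).2]
      exact List.any_eq_true.mpr ⟨f, hf, hin⟩
    · rintro ⟨kw, hkwm, hin⟩
      rw [pv_isIn_combined _ _ (hkw kw hkwm).2] at hin
      obtain ⟨f, hf, hin⟩ := List.any_eq_true.mp hin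
      refine ⟨f, hf, ?_, kw, hkwm, hin⟩
      intro hveq
      rw [hveq, pv_empty_field kw (hkw kw hkwm).1] at hin
      exact absurd hin (by simp)
  rw [pv_fieldLoop_any, hcond]

lemma pv_go_eq (device_data : List (String × String)) :
    ∀ rows : List (String × List String), rows.all (fun r => r.2.all pvKwOk) = true →
      pvGoA device_data rows = pvGoB (pvCombined device_data) rows := by
  intro rows
  induction rows with
  | nil => intro _; rfl
  | cons r rest ih =>
    intro h
    obtain ⟨icon, kws⟩ := r
    rw [List.all_cons, Bool.and_eq_true] at h
    simp only [pvGoA, pvGoB]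
    rw [pv_row device_data icon kws h.1]
    cases hc : (kws.any fun kw => PySem.Str.isIn kw (pvCombined device_data)) with
    | true => simp
    | false => simpa using ih h.2

-- B's find? over the comma-joined specs is the first-match scan over the expanded rows
lemma pv_find_spec (c : String) : ∀ specs : List (String × String),
    (specs.find? (fun r => (pvSplitComma r.2).any
        (fun kw => PySem.Str.isIn kw c))).map Prod.fst
      = pvGoB c (specs.map (fun r => (r.1, pvSplitComma r.2))) := by
  intro specs
  induction specs with
  | nil => rfl
  | cons r rest ih =>
    simp only [List.find?_cons, List.map_cons, pvGoB]
    cases hc : ((pvSplitComma r.2).any fun kw => PySem.Str.isIn kw c) with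
    | true => simp
    | false => simpa using ih

-- A's vendor loop is a find? over the vendor table
lemma pv_vendor_find (v : String) : ∀ l : List (String × String),
    pvVendorLoop v l = (l.find? (fun p => PySem.Str.isIn p.1 v)).map Prod.snd := by
  intro l
  induction l with
  | nil => rfl
  | cons p rest ih =>
    obtain ⟨brand, icon⟩ := p
    simp only [pvVendorLoop, List.find?_cons]
    cases hc : PySem.Str.isIn brand v with
    | true => simp
    | false => simpa using ih

-- ===== VERDICT (by name: the statement is the Claim_ definition above) =====
theorem determine_icon_spec : Claim_equal_determine_icon := by
  intro device_data _
  unfold Spec_determine_icon determine_icon determine_icon_alt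
  rw [pv_go_eq device_data pvTypeKeywords pv_kws_ok, ← pv_specs,
    ← pv_find_spec (pvCombined device_data) pvIconSpecs]
  simp only [pv_vendor_find]
  cases hf : pvIconSpecs.find?
      (fun r => (pvSplitComma r.2).any
        (fun kw => PySem.Str.isIn kw (pvCombined device_data))) with
  | some r => simp
  | none =>
    simp only [Option.map_none]
    cases hv : pvVendorIcons.find?
        (fun p => PySem.Str.isIn p.1 (PySem.Str.lower (pvGet device_data "vendor"))) with
    | some p => simp
    | none => simp
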